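-- pv_equiv track=rewrite | github.com/Benjamin-van-Heerden/Python | google_foobar/level1/one.py | solution
-- ===== SOURCE A (Python) =====
-- def solution(data, n):
--     # Your code here
--
--     # write the counts of the numbers in data to a dictionary
--
--     data_dict = {}
--
--     for d in data:
--         if d in data_dict:
--             data_dict[d] += 1
--         else:
--             data_dict[d] = 1
--
--     # mutate the data dict such that it now reports true if data_dict[i] <= n and false otherwise
--
--     data_dict = {d: val <= n for (d, val) in data_dict.items()}
--
--     # use list comprehension to remove the numbers in data that are "falsy" in the data_dict
--
--     result = [i for i in data if data_dict[i]]
--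
--     return result
-- ===== SOURCE B (Python) =====
-- def solution(data, n):
--     # sort-then-run-scan: collect the values whose run in sorted(data)
--     # exceeds n, then keep the original-order elements not among them
--     srt = sorted(data)
--     bad = set()
--     i = 0
--     while i < len(srt):
--         x = srt[i]
--         k = i + 1
--         while k < len(srt) and srt[k] == x:
--             k += 1
--         if k - i > n:
--             bad.add(x)
--         i = k
--     return [v for v in data if v not in bad]
-- ===== Notes on version B (the rewrite author's own statement) =====
-- stated objective: alternative
-- what changed: Replaces the counting-dictionary build and dictionary-lookup filter with a sort-then-run-scan: sort the data, walk the maximal runs of equal values collecting the over-frequent values into a set, then filter the original list by non-membership (no per-value counts are ever kept).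
import Mathlib
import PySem

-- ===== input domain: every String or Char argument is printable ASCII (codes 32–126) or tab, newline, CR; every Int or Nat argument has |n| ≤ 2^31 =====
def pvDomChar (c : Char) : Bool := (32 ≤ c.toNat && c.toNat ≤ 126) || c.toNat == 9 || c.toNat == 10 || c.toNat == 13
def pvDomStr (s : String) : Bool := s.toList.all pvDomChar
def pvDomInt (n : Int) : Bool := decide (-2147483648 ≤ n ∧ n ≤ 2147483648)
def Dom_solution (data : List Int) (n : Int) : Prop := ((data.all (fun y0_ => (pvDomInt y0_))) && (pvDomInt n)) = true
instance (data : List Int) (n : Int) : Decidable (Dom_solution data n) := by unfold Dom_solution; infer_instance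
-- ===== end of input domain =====

-- B replaces A's counting dictionary by a sort-then-run-scan collecting the over-frequent values (alternative algorithm, same result).

-- ===== PORT A =====
-- count loop -> boolean dict comprehension -> filter by lookup
def solution (data : List Int) (n : Int) : List Int :=
  let data_dict : PySem.Dict Int Int :=
    data.foldl (fun d x =>
      if d.contains x then d.insert x (d.getD x 0 + 1) else d.insert x 1) PySem.Dict.empty
  let data_dict2 : PySem.Dict Int Bool :=
    data_dict.items.foldl (fun d p => d.insert p.1 (decide (p.2 ≤ n))) PySem.Dict.empty
  data.filter (fun i => data_dict2.getD i false)  -- every i ∈ data is a key, so Python's [] never raises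

-- ===== PORT B =====
-- the inner 'while k < len(srt) and srt[k] == x: k += 1' (run length past x) as recursion over the tail
def runAux (x : Int) : List Int → Nat
  | [] => 0
  | y :: t => if y == x then runAux x t + 1 else 0

-- the outer while loop over run starts ('i = k'), as recursion on the remaining suffix;
-- run values are pairwise distinct, so this list is exactly the contents of Source B's set 'bad'
def badList (n : Int) : List Int → List Int
  | [] => []
  | x :: t =>
    let k := runAux x t + 1
    let rest := (x :: t).drop k
    if n < (k : Int) then x :: badList n rest else badList n rest
  termination_by s => s.length
  decreasing_by
    all_goals
      simp only [List.drop_succ_cons, List.length_drop, List.length_cons]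
      omega

def solution_alt (data : List Int) (n : Int) : List Int :=
  let bad := badList n (PySem.List.sorted data (fun v => v) false)
  data.filter (fun v => !(bad.contains v))

-- ===== PRECONDITION & SPEC =====
def Spec_solution (data : List Int) (n : Int) (out : List Int) : Prop := out = solution_alt data n
instance (data : List Int) (n : Int) (out : List Int) : Decidable (Spec_solution data n out) := by unfold Spec_solution; infer_instance

-- ===== CLAIM (what is proved, stated in full; the proofs are below) =====
def Claim_equal_solution : Prop := ∀ (data : List Int) (n : Int), Dom_solution data n → Spec_solution data n (solution data n)

-- ===== LEMMAS AND PROOFS =====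

-- A's counting loop is Counter(data): the not-yet-present branch inserts 1 = getD+0+1.
theorem solution_dict_eq_counter (data : List Int) :
    data.foldl (fun d x =>
      if d.contains x then d.insert x (d.getD x 0 + 1) else d.insert x 1)
      (PySem.Dict.empty : PySem.Dict Int Int) = PySem.Dict.counter data := by
  rw [← PySem.Dict.foldl_insert_getD_add_one_eq_counter]
  congr 1
  funext d x
  by_cases h : d.contains x = true
  · simp [h]
  · have h0 : d.getD x 0 = 0 := PySem.Dict.getD_of_not_contains d 0 (by simpa using h)
    simp [h, h0]

-- The boolean dict looks up to (data.count i ≤ n) for every i ∈ data.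
theorem solution_dict2_getD (data : List Int) (n : Int) (i : Int) (hi : i ∈ data) :
    ((PySem.Dict.counter data).items.foldl
      (fun d p => d.insert p.1 (decide (p.2 ≤ n))) (PySem.Dict.empty : PySem.Dict Int Bool)).getD i false
      = decide ((data.count i : Int) ≤ n) := by
  have hnd : ((PySem.Dict.counter data).items.map (·.1)).Nodup := by
    have := PySem.Dict.nodup_keys_counter (xs := data)
    simpa [PySem.Dict.keys] using this
  have hfresh : ∀ p ∈ (PySem.Dict.counter data).items,
      (PySem.Dict.empty : PySem.Dict Int Bool).contains p.1 = false := by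
    intro p _; simp
  have hitems := PySem.Dict.items_foldl_insert_fresh
    (l := (PySem.Dict.counter data).items) (k := (·.1))
    (v := fun p => decide (p.2 ≤ n)) (d := PySem.Dict.empty) hfresh hnd
  apply PySem.Dict.getD_of_mem_items
  · rw [hitems]
    simp only [PySem.Dict.empty, List.nil_append, List.mem_map]
    refine ⟨(i, (data.count i : Int)), ?_, rfl⟩
    rw [PySem.Dict.items_counter]
    exact List.mem_map.mpr ⟨i, (PySem.Set.mem_ofList data i).mpr hi, rfl⟩
  · show (List.map _ _).Nodup
    rw [hitems]
    simpa [PySem.Dict.empty, Function.comp] using hnd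

-- every element of the leading run counted by runAux equals x
theorem mem_take_runAux (x : Int) (t : List Int) :
    ∀ y ∈ t.take (runAux x t), y = x := by
  induction t with
  | nil => intro y hy; simp [runAux] at hy
  | cons z t ih =>
    intro y hy
    by_cases h : z = x
    · subst h
      simp only [runAux, BEq.rfl, if_true, List.take_succ_cons, List.mem_cons] at hy
      rcases hy with h' | h'
      · exact h'
      · exact ih y h'
    · simp [runAux, h] at hy

theorem runAux_le_length (x : Int) (t : List Int) : runAux x t ≤ t.length := by
  induction t with
  | nil => simp [runAux]
  | cons z t ih =>
    by_cases h : z = x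
    · simp [runAux, h]; omega
    · simp [runAux, h]

-- after the run, the next element (if any) differs from x
theorem head_drop_runAux (x : Int) (t : List Int) :
    t.drop (runAux x t) = [] ∨ ∃ z t', t.drop (runAux x t) = z :: t' ∧ z ≠ x := by
  induction t with
  | nil => left; simp [runAux]
  | cons z t ih =>
    by_cases h : z = x
    · simpa [runAux, h] using ih
    · right; exact ⟨z, t, by simp [runAux, h], h⟩

-- unfolding equation for badList on a cons (the let-bindings and drop (k) (x::t) reduce definitionally)
theorem badList_cons (n x : Int) (t : List Int) :
    badList n (x :: t) =
      if n < ((runAux x t + 1 : Nat) : Int) then x :: badList n (t.drop (runAux x t))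
      else badList n (t.drop (runAux x t)) := by
  rw [badList]
  simp only [List.drop_succ_cons]

theorem badList_subset (n : Int) : ∀ (m : Nat) (s : List Int), s.length ≤ m →
    ∀ v ∈ badList n s, v ∈ s := by
  intro m
  induction m with
  | zero =>
    intro s hs v hv
    rw [List.length_eq_zero_iff.mp (Nat.le_zero.mp hs)] at hv
    simp [badList] at hv
  | succ m ih =>
    intro s hs v hv
    match s with
    | [] => simp [badList] at hv
    | x :: t =>
      rw [badList_cons] at hv
      have hlen : (t.drop (runAux x t)).length ≤ m := by
        have := runAux_le_length x t
        simp only [List.length_cons] at hs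
        simp [List.length_drop]; omega
      split at hv
      · rcases List.mem_cons.mp hv with h | h
        · simp [h]
        · exact List.mem_cons_of_mem x ((List.drop_subset _ _) (ih _ hlen v h))
      · exact List.mem_cons_of_mem x ((List.drop_subset _ _) (ih _ hlen v hv))

-- membership in badList on a sorted list is exactly 'count exceeds n'
theorem badList_mem_aux (n : Int) : ∀ (m : Nat) (s : List Int), s.length ≤ m →
    s.Pairwise (· ≤ ·) → ∀ v ∈ s, (v ∈ badList n s ↔ n < (s.count v : Int)) := by
  intro m
  induction m with
  | zero =>
    intro s hs _ v hv
    rw [List.length_eq_zero_iff.mp (Nat.le_zero.mp hs)] at hv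
    simp at hv
  | succ m ih =>
    intro s hlen hs v hv
    match s with
    | [] => simp at hv
    | x :: t =>
      have hle : ∀ y ∈ t, x ≤ y := (List.pairwise_cons.mp hs).1
      have hst : t.Pairwise (· ≤ ·) := (List.pairwise_cons.mp hs).2
      set r := runAux x t with hr
      set rest := t.drop r with hrest
      have hrest_sorted : rest.Pairwise (· ≤ ·) := hst.sublist (List.drop_sublist _ _)
      have hmlen : rest.length ≤ m := by
        have := runAux_le_length x t
        simp only [List.length_cons] at hlen
        simp [hrest, List.length_drop]; omega
      have hxnotin : x ∉ rest := by
        rcases head_drop_runAux x t with h | ⟨z, t', h, hzx⟩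
        · rw [hrest, h]; simp
        · rw [hrest, h]
          have hzt : z ∈ t := (List.drop_subset _ _) (h ▸ List.mem_cons_self)
          have hz : x < z := lt_of_le_of_ne (hle z hzt) (Ne.symm hzx)
          intro hmem
          rcases List.mem_cons.mp hmem with h' | h'
          · exact hzx h'.symm
          · have hzs : (t.drop r).Pairwise (· ≤ ·) := hst.sublist (List.drop_sublist _ _)
            rw [h] at hzs
            exact absurd ((List.pairwise_cons.mp hzs).1 x h') (not_le.mpr hz)
      have hsplit : t = t.take r ++ t.drop r := (List.take_append_drop _ _).symm
      have htake_count : ∀ w : Int, w ≠ x → (t.take r).count w = 0 := by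
        intro w hw
        exact List.count_eq_zero.mpr (fun hmem => hw (mem_take_runAux x t w hmem))
      have hcount_x : (x :: t).count x = r + 1 := by
        have h1 : (t.take r).count x = r := by
          calc (t.take r).count x = (t.take r).length :=
                List.count_eq_length.mpr (fun y hy => ((mem_take_runAux x t y hy) ▸ rfl))
            _ = r := List.length_take_of_le (runAux_le_length x t)
        have h2 : rest.count x = 0 := List.count_eq_zero.mpr hxnotin
        rw [List.count_cons_self]
        conv_lhs => rw [hsplit]
        rw [List.count_append, h1, ← hrest, h2]
      rw [badList_cons, ← hr, ← hrest]
      by_cases hv_eq : v = x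
      · subst hv_eq
        rw [hcount_x]
        by_cases hk : n < ((r + 1 : Nat) : Int)
        · rw [if_pos hk]
          exact iff_of_true List.mem_cons_self hk
        · rw [if_neg hk]
          exact iff_of_false
            (fun hmem => hxnotin (badList_subset n m rest hmlen _ hmem)) hk
      · have hvt : v ∈ t := by
          rcases List.mem_cons.mp hv with h | h
          · exact absurd h hv_eq
          · exact h
        have hvrest : v ∈ rest := by
          rw [hrest]
          conv at hvt => rw [hsplit]
          rcases List.mem_append.mp hvt with h | h
          · exact absurd (mem_take_runAux x t v h) hv_eq
          · exact h
        have hcount_v : (x :: t).count v = rest.count v := by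
          rw [List.count_cons_of_ne (Ne.symm hv_eq)]
          conv_lhs => rw [hsplit]
          rw [List.count_append, htake_count v hv_eq, ← hrest, Nat.zero_add]
        have ihv := ih rest hmlen hrest_sorted v hvrest
        rw [hcount_v]
        split
        · rw [List.mem_cons]
          simp only [hv_eq, false_or]
          exact ihv
        · exact ihv

theorem badList_mem (n : Int) (s : List Int) (hs : s.Pairwise (· ≤ ·)) :
    ∀ v ∈ s, (v ∈ badList n s ↔ n < (s.count v : Int)) :=
  badList_mem_aux n s.length s le_rfl hs

-- ===== VERDICT (by name: the statement is the Claim_ definition above) =====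
theorem solution_spec : Claim_equal_solution := by
  intro data n _
  show solution data n = solution_alt data n
  unfold solution solution_alt
  rw [solution_dict_eq_counter]
  apply List.filter_congr
  intro i hi
  rw [solution_dict2_getD data n i hi]
  have hsorted : (PySem.List.sorted data (fun v => v) false).Pairwise (· ≤ ·) := by
    simpa using PySem.List.sorted_pairwise (xs := data) (key := fun v => v)
  have hmem : i ∈ PySem.List.sorted data (fun v => v) false :=
    (PySem.List.mem_sorted _ _ _ _).mpr hi
  have hcount : (PySem.List.sorted data (fun v => v) false).count i = data.count i :=
    (PySem.List.sorted_perm _ _ _).count_eq i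
  have hb := badList_mem n _ hsorted i hmem
  rw [hcount] at hb
  by_cases h : (data.count i : Int) ≤ n
  · simp only [h, decide_true]
    simpa using fun hmem' => absurd (hb.mp hmem') (not_lt.mpr h)
  · simp only [h, decide_false]
    have : i ∈ badList n (PySem.List.sorted data (fun v => v) false) := hb.mpr (not_le.mp h)
    simp [this]
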